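-- pv_equiv track=rewrite | github.com/allenai/genesys | bin/pages/select.py | dict_sub
-- ===== SOURCE A (Python) =====
-- import copy
--
-- def dict_sub(d1,d2):
--     if not d1 or not d2:
--         return d1
--     d1 = copy.deepcopy(d1)
--     for k in d1:
--         if k not in d2:
--             continue
--         if isinstance(d1[k],dict):
--             d1[k] = dict_sub(d1[k],d2[k])
--         else:
--             d1[k] -= d2[k]
--     return d1
-- ===== SOURCE B (Python) =====
-- def dict_sub(d1, d2):
--     if not d1 or not d2:
--         return d1
--     out = dict(d1)
--     for k, v in d2.items():
--         if k in out:
--             out[k] -= v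
--     return out
-- ===== Notes on version B (the rewrite author's own statement) =====
-- stated objective: alternative
-- what changed: A loops over d1's keys looking each up in d2; B instead makes one shallow copy of d1 and loops over d2's items, subtracting in place at keys already present (for flat str->int dicts A's isinstance/recursion branch is dead, so both reduce to per-key subtraction).
import Mathlib
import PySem

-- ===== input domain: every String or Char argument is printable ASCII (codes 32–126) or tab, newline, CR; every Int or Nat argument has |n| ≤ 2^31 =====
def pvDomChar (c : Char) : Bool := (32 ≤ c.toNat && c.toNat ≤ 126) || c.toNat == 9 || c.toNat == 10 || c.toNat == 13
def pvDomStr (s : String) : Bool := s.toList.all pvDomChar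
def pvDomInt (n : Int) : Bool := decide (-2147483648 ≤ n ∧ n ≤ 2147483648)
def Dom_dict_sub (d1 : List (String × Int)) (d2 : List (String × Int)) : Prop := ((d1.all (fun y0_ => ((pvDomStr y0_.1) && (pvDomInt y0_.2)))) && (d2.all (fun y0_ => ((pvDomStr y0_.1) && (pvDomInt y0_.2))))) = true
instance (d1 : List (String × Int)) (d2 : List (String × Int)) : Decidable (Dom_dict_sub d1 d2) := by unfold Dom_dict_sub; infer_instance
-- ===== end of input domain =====

-- B iterates d2 updating a copy of d1 (instead of A's loop over d1's keys with lookups in d2); objective: alternative traversal.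


-- ===== PORT A =====
-- dict lookup d2[k] / 'k in d2': first match in the association list
def aLookup : List (String × Int) → String → Option Int
  | [], _ => none
  | (k, v) :: rest, x => if k = x then some v else aLookup rest x

-- A: 'if not d1 or not d2: return d1'; then for each key k of d1 (each entry of the assoc list),
-- skip if k not in d2, else d1[k] -= d2[k].  (Values are ints here, so the isinstance-dict
-- recursion branch of the Python never fires on this type.)
def dict_sub (d1 : List (String × Int)) (d2 : List (String × Int)) : List (String × Int) :=
  if d1 = [] ∨ d2 = [] then d1
  else d1.map (fun p =>
    match aLookup d2 p.1 with
    | none => p                       -- k not in d2: continue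
    | some w => (p.1, p.2 - w))       -- d1[k] -= d2[k]

-- ===== PORT B =====
-- 'k in out'
def bHasKey (d : List (String × Int)) (x : String) : Bool := d.any (fun p => p.1 = x)

-- 'out[k] -= v': subtract at the first entry with key x
def bSub : List (String × Int) → String → Int → List (String × Int)
  | [], _, _ => []
  | (k, v) :: rest, x, w => if k = x then (k, v - w) :: rest else (k, v) :: bSub rest x w

-- B: copy d1, then for each (k, v) in d2.items(): if k in out: out[k] -= v
def dict_sub_alt (d1 : List (String × Int)) (d2 : List (String × Int)) : List (String × Int) :=
  if d1 = [] ∨ d2 = [] then d1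
  else d2.foldl (fun acc p => if bHasKey acc p.1 then bSub acc p.1 p.2 else acc) d1

-- ===== PRECONDITION & SPEC =====
-- Pre_ excludes association lists with duplicate keys: a Python dict has distinct keys, so such
-- lists represent no input either Python program can receive, and neither list-level reading of
-- them is specified.
def Pre_dict_sub (d1 : List (String × Int)) (d2 : List (String × Int)) : Prop :=
  (d1.map Prod.fst).Nodup ∧ (d2.map Prod.fst).Nodup
instance (d1 : List (String × Int)) (d2 : List (String × Int)) : Decidable (Pre_dict_sub d1 d2) := by unfold Pre_dict_sub; infer_instance

def pvWitness_dict_sub : (List (String × Int)) × (List (String × Int)) := ([("a", 3), ("b", 1)], [("a", 1)])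

def Spec_dict_sub (d1 : List (String × Int)) (d2 : List (String × Int)) (out : List (String × Int)) : Prop := out = dict_sub_alt d1 d2
instance (d1 : List (String × Int)) (d2 : List (String × Int)) (out : List (String × Int)) : Decidable (Spec_dict_sub d1 d2 out) := by unfold Spec_dict_sub; infer_instance

-- ===== CLAIM (what is proved, stated in full; the proofs are below) =====
def Claim_equal_dict_sub : Prop := ∀ (d1 : List (String × Int)) (d2 : List (String × Int)), Dom_dict_sub d1 d2 → Pre_dict_sub d1 d2 → Spec_dict_sub d1 d2 (dict_sub d1 d2)

-- ===== LEMMAS AND PROOFS =====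

-- the per-entry update A performs, as a function of the whole of d2
def updA (d2 : List (String × Int)) (p : String × Int) : String × Int :=
  match aLookup d2 p.1 with
  | none => p
  | some w => (p.1, p.2 - w)

-- B's loop step
def stepB (acc : List (String × Int)) (p : String × Int) : List (String × Int) :=
  if bHasKey acc p.1 then bSub acc p.1 p.2 else acc

lemma keys_bSub (acc : List (String × Int)) (x : String) (w : Int) :
    (bSub acc x w).map Prod.fst = acc.map Prod.fst := by
  induction acc with
  | nil => simp [bSub]
  | cons p rest ih =>
      obtain ⟨k, v⟩ := p
      by_cases h : k = x <;> simp [bSub, h, ih]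

lemma keys_stepB (acc : List (String × Int)) (p : String × Int) :
    (stepB acc p).map Prod.fst = acc.map Prod.fst := by
  unfold stepB; split_ifs <;> simp [keys_bSub]

-- one step of B, against A's per-entry description: processing (k, w) subtracts w exactly at the key k
lemma stepB_map (k : String) (w : Int) (d2' : List (String × Int))
    (hk : aLookup d2' k = none) :
    ∀ acc : List (String × Int), (acc.map Prod.fst).Nodup →
      (stepB acc (k, w)).map (updA d2') =
        acc.map (fun p => if p.1 = k then (p.1, p.2 - w) else updA d2' p) := by
  intro acc
  induction acc with
  | nil => intro _; simp [stepB, bHasKey]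
  | cons p rest ih =>
      intro hnd
      obtain ⟨k', v⟩ := p
      simp only [List.map_cons, List.nodup_cons] at hnd
      by_cases h : k' = k
      · subst h
        have hstep : stepB ((k', v) :: rest) (k', w) = (k', v - w) :: rest := by
          simp [stepB, bHasKey, bSub]
        rw [hstep]
        simp only [List.map_cons]
        refine List.cons_eq_cons.mpr ⟨by simp [updA, hk], ?_⟩
        apply List.map_congr_left
        intro q hq
        have hne : q.1 ≠ k' := by
          intro he
          exact hnd.1 (he ▸ (List.mem_map.mpr ⟨q, hq, rfl⟩))
        simp [hne]
      · have hcond : bHasKey ((k', v) :: rest) k = bHasKey rest k := by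
          simp [bHasKey, h]
        have hstep : stepB ((k', v) :: rest) (k, w) = (k', v) :: stepB rest (k, w) := by
          unfold stepB
          rw [hcond]
          by_cases hb : bHasKey rest k = true
          · simp [hb, bSub, h]
          · simp [hb]
        rw [hstep]
        simp only [List.map_cons, ih hnd.2]
        simp [h]

lemma aLookup_eq_none (d : List (String × Int)) (k : String) (h : k ∉ d.map Prod.fst) :
    aLookup d k = none := by
  induction d with
  | nil => rfl
  | cons p rest ih =>
      obtain ⟨k', v⟩ := p
      simp only [List.map_cons, List.mem_cons, not_or] at h
      simp only [aLookup]
      rw [if_neg (fun e => h.1 e.symm), ih h.2]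

-- B's whole loop equals A's map, for nodup keys on both sides
lemma foldl_stepB_eq_map (d2 : List (String × Int)) (hnd2 : (d2.map Prod.fst).Nodup) :
    ∀ acc : List (String × Int), (acc.map Prod.fst).Nodup →
      d2.foldl stepB acc = acc.map (updA d2) := by
  induction d2 with
  | nil =>
      intro acc _
      simp only [List.foldl_nil]
      have : acc.map (updA []) = acc.map id := by
        apply List.map_congr_left; intro p _; simp [updA, aLookup]
      simp [this]
  | cons q d2' ih =>
      intro acc hacc
      obtain ⟨k, w⟩ := q
      simp only [List.map_cons, List.nodup_cons] at hnd2
      have hk : aLookup d2' k = none := aLookup_eq_none d2' k hnd2.1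
      have hstepnd : ((stepB acc (k, w)).map Prod.fst).Nodup := by
        rw [keys_stepB]; exact hacc
      calc ((k, w) :: d2').foldl stepB acc
          = d2'.foldl stepB (stepB acc (k, w)) := by simp
        _ = (stepB acc (k, w)).map (updA d2') := ih hnd2.2 _ hstepnd
        _ = acc.map (fun p => if p.1 = k then (p.1, p.2 - w) else updA d2' p) :=
            stepB_map k w d2' hk acc hacc
        _ = acc.map (updA ((k, w) :: d2')) := by
            apply List.map_congr_left
            intro p _
            by_cases h : p.1 = k
            · simp [updA, aLookup, h]
            · have : ¬ (k = p.1) := fun he => h he.symm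
              simp [updA, aLookup, h, this]

-- ===== VERDICT (by name: the statement is the Claim_ definition above) =====
theorem dict_sub_spec : Claim_equal_dict_sub := by
  intro d1 d2 _ hpre
  unfold Spec_dict_sub dict_sub dict_sub_alt
  by_cases h : d1 = [] ∨ d2 = []
  · simp [h]
  · rw [if_neg h, if_neg h]
    have := foldl_stepB_eq_map d2 hpre.2 d1 hpre.1
    unfold stepB at this
    rw [this]
    apply List.map_congr_left
    intro p _
    simp [updA]
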